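-- pv_equiv track=rewrite | github.com/blanckth/BaseConv | baseChanger.py | baseToTen
-- ===== SOURCE A (Python) =====
-- alphaNumArr = [["A", 10], ["B", 11], ["C", 12], ["D", 13],
--                ["E", 14], ["F", 15], ["G", 16], ["H", 17],
--                ["I", 18], ["J", 19], ["K", 20], ["L", 21],
--                ["M", 22], ["N", 23], ["O", 24], ["P", 25],
--                ["Q", 26], ["R", 27], ["S", 28], ["T", 29],
--                ["U", 30], ["V", 31], ["W", 32], ["X", 33],
--                ["Y", 34], ["Z", 35]]
--
-- def baseToTen(num, base):
--     revNum = str(num)[::-1]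
--     tenBaseNum = 0
--     placeCounter = 0
--     for z in revNum:
--         if z.isnumeric():
--             tenBaseNum += (int(z) * (base ** placeCounter))
--             placeCounter += 1
--         else:
--             for a in range(base-10):
--                 if z.upper() == alphaNumArr[a][0]:
--                     rn = int(alphaNumArr[a][1])
--                     tenBaseNum += rn * (base ** placeCounter)
--                     placeCounter += 1
--                     break
--     return tenBaseNum
-- ===== SOURCE B (Python) =====
-- def baseToTen(num, base):
--     # Horner's method: one running accumulator, no per-digit exponentiation,
--     # arithmetic digit decoding instead of scanning a 26-entry table.
--     acc = 0
--     for ch in str(num):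
--         if ch.isdigit():
--             acc = acc * base + (ord(ch) - 48)
--         else:
--             v = ord(ch.upper()) - 55  # 'A' -> 10 ... 'Z' -> 35
--             if 10 <= v <= 35 and v < base:
--                 acc = acc * base + v
--     return acc
-- ===== Notes on version B (the rewrite author's own statement) =====
-- stated objective: faster
-- what changed: B replaces A's reverse-then-sum with per-digit exponentiation (base ** placeCounter) and a linear 26-entry table scan per letter by a single left-to-right Horner accumulator with arithmetic ord()-based digit decoding.
import Mathlib
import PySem

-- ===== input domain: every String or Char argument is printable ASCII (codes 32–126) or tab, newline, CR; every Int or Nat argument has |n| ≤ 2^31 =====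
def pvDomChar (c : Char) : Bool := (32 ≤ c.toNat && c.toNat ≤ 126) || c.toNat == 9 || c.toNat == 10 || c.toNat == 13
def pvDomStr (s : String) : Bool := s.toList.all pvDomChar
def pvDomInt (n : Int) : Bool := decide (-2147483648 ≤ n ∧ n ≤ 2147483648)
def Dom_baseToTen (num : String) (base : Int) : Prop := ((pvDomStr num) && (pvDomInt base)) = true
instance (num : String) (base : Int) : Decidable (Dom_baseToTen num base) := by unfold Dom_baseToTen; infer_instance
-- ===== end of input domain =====

-- B replaces A's per-character exponentiation and 26-entry table scan with a single
-- Horner accumulator and arithmetic digit decoding (objective: faster).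

-- ===== PORT A =====
-- Python's 1-character strings in alphaNumArr are ported as List Char (str equality = list equality).
def alphaNumArr : List (List Char × Int) :=
  [(['A'], 10), (['B'], 11), (['C'], 12), (['D'], 13),
   (['E'], 14), (['F'], 15), (['G'], 16), (['H'], 17),
   (['I'], 18), (['J'], 19), (['K'], 20), (['L'], 21),
   (['M'], 22), (['N'], 23), (['O'], 24), (['P'], 25),
   (['Q'], 26), (['R'], 27), (['S'], 28), (['T'], 29),
   (['U'], 30), (['V'], 31), (['W'], 32), (['X'], 33),
   (['Y'], 34), (['Z'], 35)]

-- inner 'for a in range(base-10): … break', iterated lazily as Python's range is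
-- (a counts up, fuel counts the remaining iterations); the 'none' arm is Python's
-- IndexError on alphaNumArr[a] (those inputs are excluded by Pre_baseToTen).
def innerAux (z : Char) (base tb : Int) (pc : Nat) (a : Int) : Nat → Int × Nat
  | 0 => (tb, pc)
  | fuel + 1 =>
    match PySem.List.pyGet? alphaNumArr a with
    | none => (tb, pc)
    | some entry =>
      if PySem.Chars.upper [z] = entry.1 then (tb + entry.2 * base ^ pc, pc + 1)
      else innerAux z base tb pc (a + 1) fuel

-- z.isnumeric() coincides with isdigit on printable ASCII (Dom_); int(z) on an ASCII digit is ord(z) - 48.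
def outerA (base : Int) : List Char → Int → Nat → Int
  | [], tb, _ => tb
  | z :: rest, tb, pc =>
    if PySem.Chars.isdigit z then
      outerA base rest (tb + ((z.toNat : Int) - 48) * base ^ pc) (pc + 1)
    else
      let s := innerAux z base tb pc 0 (base - 10).toNat
      outerA base rest s.1 s.2

-- str(num) = num (num is a str); str(num)[::-1] is the reversed character list.
def baseToTen (num : String) (base : Int) : Int :=
  outerA base num.toList.reverse 0 0

-- ===== PORT B =====
-- Source B: Horner accumulator over the string left to right; ord-arithmetic decoding,
-- letters count only when their value is below the base.
def baseToTen_alt (num : String) (base : Int) : Int :=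
  num.toList.foldl (fun acc ch =>
    if PySem.Chars.isdigit ch then acc * base + ((ch.toNat : Int) - 48)
    else
      let v : Int := ((PySem.Chars.upperChar ch).toNat : Int) - 55
      if 10 ≤ v ∧ v ≤ 35 ∧ v < base then acc * base + v else acc) 0

-- ===== PRECONDITION & SPEC =====
-- A raises IndexError (alphaNumArr[a] with a ≥ 26) exactly when base ≥ 37 and num has a
-- character that is neither a digit nor a letter; Pre_ excludes exactly those inputs.
def Pre_baseToTen (num : String) (base : Int) : Prop :=
  base ≤ 36 ∨ ∀ c ∈ num.toList, PySem.Chars.isalnum c = true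
instance (num : String) (base : Int) : Decidable (Pre_baseToTen num base) := by
  unfold Pre_baseToTen; infer_instance

def pvWitness_baseToTen : String × Int := ("1A", 16)

def Spec_baseToTen (num : String) (base : Int) (out : Int) : Prop := out = baseToTen_alt num base
instance (num : String) (base : Int) (out : Int) : Decidable (Spec_baseToTen num base out) := by
  unfold Spec_baseToTen; infer_instance

-- ===== CLAIM (what is proved, stated in full; the proofs are below) =====
def Claim_equal_baseToTen : Prop := ∀ (num : String) (base : Int), Dom_baseToTen num base → Pre_baseToTen num base → Spec_baseToTen num base (baseToTen num base)

-- ===== LEMMAS AND PROOFS =====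

-- list form of the inner scan (the materialized range), used only by the proofs
def innerAList (z : Char) (base tb : Int) (pc : Nat) : List Int → Int × Nat
  | [] => (tb, pc)
  | a :: rest =>
    match PySem.List.pyGet? alphaNumArr a with
    | none => (tb, pc)
    | some entry =>
      if PySem.Chars.upper [z] = entry.1 then (tb + entry.2 * base ^ pc, pc + 1)
      else innerAList z base tb pc rest

lemma innerAux_eq_list (z : Char) (base tb : Int) (pc : Nat) (fuel : Nat) (a : Int) :
    innerAux z base tb pc a fuel = innerAList z base tb pc (PySem.List.pyRange a (a + fuel) 1) := by
  induction fuel generalizing a with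
  | zero =>
    rw [PySem.List.pyRange_one_eq_nil (by omega)]
    rfl
  | succ fuel ih =>
    rw [PySem.List.pyRange_one_cons (by omega), innerAux, innerAList]
    cases PySem.List.pyGet? alphaNumArr a with
    | none => rfl
    | some entry =>
      dsimp only
      split
      · rfl
      · rw [ih (a + 1)]
        have : a + 1 + (fuel : Int) = a + ((fuel : Nat) + 1 : Nat) := by push_cast; ring
        rw [this]

-- the recognized digit value of a character (none = the character is skipped)
def rv (base : Int) (c : Char) : Option Int :=
  if PySem.Chars.isdigit c then some ((c.toNat : Int) - 48)
  else
    let v : Int := ((PySem.Chars.upperChar c).toNat : Int) - 55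
    if 10 ≤ v ∧ v ≤ 35 ∧ v < base then some v else none

-- little-endian polynomial value of a digit list
def polyLE (base : Int) : List Int → Int
  | [] => 0
  | d :: ds => d + base * polyLE base ds

lemma toNat_ofNat_valid {n : Nat} (h1 : 65 ≤ n) (h2 : n ≤ 90) : (Char.ofNat n).toNat = n := by
  rw [Char.toNat_ofNat, if_pos (Or.inl (by omega))]

lemma islower_iff (c : Char) : PySem.Chars.islower c = true ↔ 97 ≤ c.toNat ∧ c.toNat ≤ 122 := by
  simp [PySem.Chars.islower]; exact Iff.rfl

lemma isupper_iff (c : Char) : PySem.Chars.isupper c = true ↔ 65 ≤ c.toNat ∧ c.toNat ≤ 90 := by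
  simp [PySem.Chars.isupper]; exact Iff.rfl

lemma upperChar_alpha {c : Char} (h : PySem.Chars.isalpha c = true) :
    65 ≤ (PySem.Chars.upperChar c).toNat ∧ (PySem.Chars.upperChar c).toNat ≤ 90 := by
  unfold PySem.Chars.isalpha at h
  rw [Bool.or_eq_true] at h
  rcases h with hu | hl
  · rw [isupper_iff] at hu
    have hnl : PySem.Chars.islower c = false := by
      rw [Bool.eq_false_iff, Ne, islower_iff]; omega
    simpa [PySem.Chars.upperChar, hnl] using hu
  · have hl' := (islower_iff c).mp hl
    simp only [PySem.Chars.upperChar, hl, if_true]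
    rw [toNat_ofNat_valid (by omega) (by omega)]; omega

-- entry a of the table, for an in-range index
lemma entry_at (a : Int) (h0 : 0 ≤ a) (h1 : a < 26) :
    PySem.List.pyGet? alphaNumArr a = some ([Char.ofNat (65 + a.toNat)], a + 10) := by
  interval_cases a <;> decide

-- scanning a stretch of indices that cannot match (in range, wrong letter) changes nothing
lemma innerAList_append (z : Char) (base tb : Int) (pc : Nat) (l₁ l₂ : List Int)
    (h : ∀ a ∈ l₁, 0 ≤ a ∧ a < 26 ∧ 65 + a.toNat ≠ (PySem.Chars.upperChar z).toNat) :
    innerAList z base tb pc (l₁ ++ l₂) = innerAList z base tb pc l₂ := by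
  induction l₁ with
  | nil => rfl
  | cons a rest ih =>
    obtain ⟨h0, h1, h2⟩ := h a (List.mem_cons_self ..)
    rw [List.cons_append, innerAList, entry_at a h0 h1]
    have hne : ¬ (PySem.Chars.upper [z] = [Char.ofNat (65 + a.toNat)]) := by
      simp only [PySem.Chars.upper, List.map_cons, List.map_nil, List.cons.injEq, and_true]
      intro heq
      have : (PySem.Chars.upperChar z).toNat = 65 + a.toNat := by
        rw [heq, toNat_ofNat_valid (by omega) (by omega)]
      omega
    simp only [hne, if_false]
    exact ih (fun a ha => h a (List.mem_cons_of_mem _ ha))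

lemma innerAList_no_match (z : Char) (base tb : Int) (pc : Nat) (l : List Int)
    (h : ∀ a ∈ l, 0 ≤ a ∧ a < 26 ∧ 65 + a.toNat ≠ (PySem.Chars.upperChar z).toNat) :
    innerAList z base tb pc l = (tb, pc) := by
  have := innerAList_append z base tb pc l [] h
  simpa [innerAList] using this

-- the inner scan computes exactly rv (for a non-digit character, under Pre_'s guarantee)
lemma innerAList_eq (z : Char) (base tb : Int) (pc : Nat)
    (hdz : PySem.Chars.isdigit z = false)
    (hok : base ≤ 36 ∨ PySem.Chars.isalnum z = true) :
    innerAList z base tb pc (PySem.List.pyRange 0 (base - 10) 1)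
      = match rv base z with
        | some d => (tb + d * base ^ pc, pc + 1)
        | none => (tb, pc) := by
  have hcast : ∀ a : Int, 0 ≤ a → (a.toNat : Int) = a := fun a ha => Int.toNat_of_nonneg ha
  set u : Nat := (PySem.Chars.upperChar z).toNat with hu
  by_cases hL : 10 ≤ (u : Int) - 55 ∧ (u : Int) - 55 ≤ 35
  · set v : Int := (u : Int) - 55 with hv
    by_cases hvb : v < base
    · have hrv : rv base z = some v := by
        simp only [rv, hdz, if_false, Bool.false_eq_true, ← hu, ← hv]
        rw [if_pos ⟨hL.1, hL.2, hvb⟩]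
      rw [hrv]
      rw [PySem.List.pyRange_one_append 0 (v - 10) (base - 10) (by omega) (by omega)]
      rw [innerAList_append z base tb pc _ _ (by
        intro a ha
        rw [PySem.List.mem_pyRange_one] at ha
        have := hcast a ha.1
        refine ⟨ha.1, by omega, by omega⟩)]
      rw [PySem.List.pyRange_one_cons (by omega), innerAList,
        entry_at (v - 10) (by omega) (by omega)]
      have hmatch : PySem.Chars.upper [z] = [Char.ofNat (65 + (v - 10).toNat)] := by
        have : 65 + (v - 10).toNat = u := by omega
        rw [this]
        simp only [PySem.Chars.upper, List.map_cons, List.map_nil, hu, Char.ofNat_toNat]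
      dsimp only
      rw [if_pos hmatch]
      have hvv : (v - 10 + 10 : Int) = v := by omega
      rw [hvv]
    · have hrv : rv base z = none := by
        simp only [rv, hdz, if_false, Bool.false_eq_true, ← hu]
        rw [if_neg (by push Not; intro _ _; omega)]
      rw [hrv, innerAList_no_match z base tb pc _ (by
        intro a ha
        rw [PySem.List.mem_pyRange_one] at ha
        have := hcast a ha.1
        refine ⟨ha.1, by omega, by omega⟩)]
  · have hrv : rv base z = none := by
      simp only [rv, hdz, if_false, Bool.false_eq_true, ← hu]
      rw [if_neg (by push Not; intro h1 h2; omega)]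
    have hb36 : base ≤ 36 := by
      rcases hok with h | h
      · exact h
      · exfalso
        unfold PySem.Chars.isalnum at h
        rw [Bool.or_eq_true] at h
        rcases h with ha | hd
        · have := upperChar_alpha ha
          rw [← hu] at this; omega
        · rw [hdz] at hd; exact Bool.false_ne_true hd
    have hbound : ¬ (65 ≤ u ∧ u ≤ 90) := by omega
    rw [hrv, innerAList_no_match z base tb pc _ (by
      intro a ha
      rw [PySem.List.mem_pyRange_one] at ha
      have := hcast a ha.1
      refine ⟨ha.1, by omega, by omega⟩)]

-- A's outer loop: accumulated sum of recognized digit values times growing powers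
lemma outerA_eq (base : Int) (l : List Char) (tb : Int) (pc : Nat)
    (hok : base ≤ 36 ∨ ∀ c ∈ l, PySem.Chars.isalnum c = true) :
    outerA base l tb pc = tb + base ^ pc * polyLE base (l.filterMap (rv base)) := by
  induction l generalizing tb pc with
  | nil => simp [outerA, polyLE]
  | cons z rest ih =>
    have hokr : base ≤ 36 ∨ ∀ c ∈ rest, PySem.Chars.isalnum c = true := by
      rcases hok with h | h
      · exact Or.inl h
      · exact Or.inr fun c hc => h c (List.mem_cons_of_mem _ hc)
    by_cases hdz : PySem.Chars.isdigit z
    · have hrv : rv base z = some ((z.toNat : Int) - 48) := by simp [rv, hdz]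
      simp only [outerA, hdz, if_true, List.filterMap_cons, hrv]
      rw [ih _ _ hokr, polyLE, pow_succ]
      ring
    · have hokz : base ≤ 36 ∨ PySem.Chars.isalnum z = true := by
        rcases hok with h | h
        · exact Or.inl h
        · exact Or.inr (h z (List.mem_cons_self ..))
      have hdz' : PySem.Chars.isdigit z = false := by simpa using hdz
      simp only [outerA, hdz', Bool.false_eq_true, if_false]
      have hr : PySem.List.pyRange 0 (0 + ((base - 10).toNat : Int)) 1
          = PySem.List.pyRange 0 (base - 10) 1 := by
        by_cases h10 : 10 ≤ base
        · congr 1; omega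
        · rw [PySem.List.pyRange_one_eq_nil (by omega), PySem.List.pyRange_one_eq_nil (by omega)]
      rw [innerAux_eq_list, hr, innerAList_eq z base tb pc hdz' hokz]
      cases hrv : rv base z with
      | none =>
        simp only [List.filterMap_cons, hrv]
        exact ih _ _ hokr
      | some d =>
        simp only [List.filterMap_cons, hrv]
        rw [ih _ _ hokr, polyLE, pow_succ]
        ring

lemma polyLE_append_singleton (base d : Int) (ds : List Int) :
    polyLE base (ds ++ [d]) = polyLE base ds + d * base ^ ds.length := by
  induction ds with
  | nil => simp [polyLE]
  | cons e rest ih => simp [polyLE, ih, pow_succ]; ring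

-- B's Horner fold, in closed form
lemma horner_foldl (base : Int) (ds : List Int) (acc : Int) :
    ds.foldl (fun a d => a * base + d) acc = acc * base ^ ds.length + polyLE base ds.reverse := by
  induction ds generalizing acc with
  | nil => simp [polyLE]
  | cons d rest ih =>
    rw [List.foldl_cons, ih, List.reverse_cons, polyLE_append_singleton]
    simp [pow_succ, List.length_reverse]
    ring

-- B's per-character step is exactly rv
lemma alt_eq (num : String) (base : Int) :
    baseToTen_alt num base
      = (num.toList.filterMap (rv base)).foldl (fun a d => a * base + d) 0 := by
  unfold baseToTen_alt
  induction num.toList using List.reverseRecOn with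
  | nil => rfl
  | append_singleton l c ih =>
    rw [List.foldl_append, List.filterMap_append, List.foldl_append, ih]
    simp only [List.foldl_cons, List.foldl_nil, List.filterMap_cons, List.filterMap_nil, rv]
    split_ifs <;> simp [List.foldl]

-- ===== VERDICT (by name: the statement is the Claim_ definition above) =====
theorem baseToTen_spec : Claim_equal_baseToTen := by
  intro num base _ hpre
  unfold Spec_baseToTen
  have hok : base ≤ 36 ∨ ∀ c ∈ num.toList.reverse, PySem.Chars.isalnum c = true := by
    rcases hpre with h | h
    · exact Or.inl h
    · exact Or.inr fun c hc => h c (List.mem_reverse.mp hc)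
  rw [baseToTen, outerA_eq base _ 0 0 hok, alt_eq, horner_foldl]
  rw [List.filterMap_reverse]
  simp
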